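-- pv_equiv track=rewrite | github.com/matheusaraujo/coding-challenges | advent-of-code/2019/day16/helpers.py | apply_phase
-- ===== SOURCE A (Python) =====
-- BASE_PATTERN = [0, 1, 0, -1]
--
-- def build_pattern(position, length):
--     pattern = []
--     for p in BASE_PATTERN:
--         pattern.extend([p] * position)
--     # repeat pattern until long enough
--     while len(pattern) <= length:
--         pattern *= 2
--     # skip the very first value
--     return pattern[1 : length + 1]
--
-- def apply_phase(signal):
--     output = []
--     length = len(signal)
--
--     for i in range(length):
--         pattern = build_pattern(i + 1, length)
--         value = sum(a * b for a, b in zip(signal, pattern))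
--         output.append(abs(value) % 10)
--
--     return output
-- ===== SOURCE B (Python) =====
-- def apply_phase(sig):
--     n = len(sig)
--     prefix = [0]
--     for v in sig:
--         prefix.append(prefix[-1] + v)
--     output = []
--     for k in range(1, n + 1):
--         total = 0
--         sign = 1
--         start = k - 1
--         while start < n:
--             end = min(start + k, n)
--             total += sign * (prefix[end] - prefix[start])
--             sign = -sign
--             start += 2 * k
--         output.append(abs(total) % 10)
--     return output
-- ===== Notes on version B (the rewrite author's own statement) =====
-- stated objective: faster
-- what changed: B precomputes one prefix-sum array and, for each output position k, sums only the pattern's +1/-1 blocks as O(1) range queries (n/2k blocks), instead of A rebuilding the full repeated pattern and zip-multiplying over the whole signal for every position.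
import Mathlib
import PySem

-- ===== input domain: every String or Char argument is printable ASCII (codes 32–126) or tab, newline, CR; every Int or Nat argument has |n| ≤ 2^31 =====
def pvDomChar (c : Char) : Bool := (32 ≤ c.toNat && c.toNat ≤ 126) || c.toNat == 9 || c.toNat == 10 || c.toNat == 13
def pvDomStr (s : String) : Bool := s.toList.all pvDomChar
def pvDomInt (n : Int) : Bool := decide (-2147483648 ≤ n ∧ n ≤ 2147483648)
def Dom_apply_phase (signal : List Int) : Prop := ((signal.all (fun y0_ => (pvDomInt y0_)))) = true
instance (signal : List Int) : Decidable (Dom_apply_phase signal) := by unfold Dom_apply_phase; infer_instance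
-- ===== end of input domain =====

-- B replaces A's per-index O(n) rebuild-the-pattern-and-zip scan by prefix sums over the
-- pattern's ±1 blocks (O(n log n) total); measured asymptotically faster.

-- ===== PORT A =====
def pvBase : List Int := [0, 1, 0, -1]

-- the `while len(pattern) <= length: pattern *= 2` loop (the isEmpty test only makes it
-- total; A always calls it with a nonempty list)
def pvDouble (p : List Int) (len : Nat) : List Int :=
  if _h : p.length ≤ len then
    if _hp : p.length = 0 then p
    else pvDouble (p ++ p) len
  else p
termination_by len + 1 - p.length
decreasing_by simp only [List.length_append]; omega

def build_pattern (position len : Nat) : List Int :=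
  let p0 := pvBase.foldl (fun acc p => acc ++ List.replicate position p) []
  let pattern := pvDouble p0 len
  PySem.List.slice pattern (some 1) (some ((len : Int) + 1))

def apply_phase (signal : List Int) : List Int :=
  let length := signal.length
  (List.range length).map (fun i =>
    let pattern := build_pattern (i + 1) length
    let value := ((signal.zip pattern).map (fun ab => ab.1 * ab.2)).sum
    ((value.natAbs : Int)) % 10)

-- ===== PORT B =====
-- prefix = [0]; for v in signal: prefix.append(prefix[-1] + v)
def pvPrefix (signal : List Int) : List Int :=
  signal.foldl (fun pre v => pre ++ [PySem.List.pyGetD pre (-1) 0 + v]) [0]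

-- the inner `while start < n` loop (the 0 < k test only makes it total; B calls it with k ≥ 1)
def pvInner (pre : List Int) (n k start : Nat) (sign total : Int) : Int :=
  if _h : start < n ∧ 0 < k then
    pvInner pre n k (start + 2 * k) (-sign)
      (total + sign * (pre.getD (min (start + k) n) 0 - pre.getD start 0))
  else total
termination_by n - start

def apply_phase_alt (signal : List Int) : List Int :=
  let n := signal.length
  let pre := pvPrefix signal
  (List.range n).map (fun i =>
    let k := i + 1
    let total := pvInner pre n k (k - 1) 1 0
    ((total.natAbs : Int)) % 10)

-- ===== PRECONDITION & SPEC =====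
def Spec_apply_phase (signal : List Int) (out : List Int) : Prop := out = apply_phase_alt signal
instance (signal : List Int) (out : List Int) : Decidable (Spec_apply_phase signal out) := by unfold Spec_apply_phase; infer_instance

-- ===== CLAIM (what is proved, stated in full; the proofs are below) =====
def Claim_equal_apply_phase : Prop := ∀ (signal : List Int), Dom_apply_phase signal → Spec_apply_phase signal (apply_phase signal)

-- ===== LEMMAS AND PROOFS =====

-- the weight the FFT pattern assigns to input index j for output position k (1-based)
def pvW (k j : Nat) : Int := pvBase.getD ((j + 1) / k % 4) 0

-- both per-position values equal this reference sum
def pvRef (s : List Int) (k a b : Nat) : Int := ∑ j ∈ Finset.Ico a b, s.getD j 0 * pvW k j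

theorem pv_sum_getD (l : List Int) : l.sum = ∑ j ∈ Finset.range l.length, l.getD j 0 := by
  induction l with
  | nil => simp
  | cons a t ih => simp [Finset.sum_range_succ', ih, add_comm]


-- ---- the repeated base block [0]*k ++ [1]*k ++ [0]*k ++ [-1]*k ----

theorem pv_p0_eq (k : Nat) :
    pvBase.foldl (fun acc p => acc ++ List.replicate k p) [] =
    List.replicate k 0 ++ (List.replicate k 1 ++ (List.replicate k 0 ++ List.replicate k (-1 : Int))) := by
  simp [pvBase, List.foldl]

theorem pv_p0_length (k : Nat) :
    (pvBase.foldl (fun acc p => acc ++ List.replicate k p) ([] : List Int)).length = 4 * k := by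
  rw [pv_p0_eq]; simp; omega

theorem pv_getD_replicate (x : Int) (k t : Nat) (h : t < k) :
    (List.replicate k x).getD t 0 = x := by
  rw [List.getD_eq_getElem _ _ (by simpa using h)]; simp

theorem pv_p0_getD (k t : Nat) (hk : 0 < k) (ht : t < 4 * k) :
    (pvBase.foldl (fun acc p => acc ++ List.replicate k p) ([] : List Int)).getD t 0 =
    pvBase.getD (t / k) 0 := by
  rw [pv_p0_eq]
  by_cases h0 : t < k
  · rw [List.getD_append _ _ _ _ (by simpa using h0), pv_getD_replicate _ _ _ h0,
        Nat.div_eq_of_lt h0]; rfl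
  · rw [List.getD_append_right _ _ _ _ (by simp; omega)]
    simp only [List.length_replicate]
    by_cases h1 : t < 2 * k
    · have hd : t / k = 1 := Nat.div_eq_of_lt_le (by omega) (by omega)
      rw [List.getD_append _ _ _ _ (by simp; omega), pv_getD_replicate _ _ _ (by omega), hd]; rfl
    · rw [List.getD_append_right _ _ _ _ (by simp; omega)]
      simp only [List.length_replicate]
      by_cases h2 : t < 3 * k
      · have hd : t / k = 2 := Nat.div_eq_of_lt_le (by omega) (by omega)
        rw [List.getD_append _ _ _ _ (by simp; omega), pv_getD_replicate _ _ _ (by omega), hd]; rfl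
      · have hd : t / k = 3 := Nat.div_eq_of_lt_le (by omega) (by omega)
        rw [List.getD_append_right _ _ _ _ (by simp; omega)]
        simp only [List.length_replicate]
        rw [pv_getD_replicate _ _ _ (by omega), hd]; rfl

-- ---- the doubling loop yields a whole number of copies of its input ----

theorem pv_flatten_replicate_double (p : List Int) (m : Nat) :
    (List.replicate m (p ++ p)).flatten = (List.replicate (2 * m) p).flatten := by
  induction m with
  | zero => simp
  | succ m ih =>
      have h2 : 2 * (m + 1) = (2 * m) + 1 + 1 := by omega
      simp [List.replicate_succ, ih, h2, List.append_assoc]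

theorem pvDouble_spec (p : List Int) (len : Nat) (hp : 0 < p.length) :
    ∃ m, 0 < m ∧ pvDouble p len = (List.replicate m p).flatten ∧ len < m * p.length := by
  fun_induction pvDouble p len with
  | case1 p hle hz => omega
  | case2 p hle hz ih =>
      obtain ⟨m, hm, heq, hlt⟩ := ih (by simpa using hp)
      refine ⟨2 * m, by omega, ?_, ?_⟩
      · rw [heq, pv_flatten_replicate_double]
      · simp only [List.length_append] at hlt
        calc len < m * (p.length + p.length) := hlt
          _ = 2 * m * p.length := by ring
  | case3 p hgt => exact ⟨1, by omega, by simp, by omega⟩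

theorem pv_getD_flatten_replicate (p : List Int) (m j : Nat) (hp : 0 < p.length)
    (hj : j < m * p.length) :
    ((List.replicate m p).flatten).getD j 0 = p.getD (j % p.length) 0 := by
  induction m generalizing j with
  | zero => omega
  | succ m ih =>
      rw [List.replicate_succ, List.flatten_cons]
      by_cases h : j < p.length
      · rw [List.getD_append _ _ _ _ h, Nat.mod_eq_of_lt h]
      · have hsm : (m + 1) * p.length = m * p.length + p.length := by ring
        rw [List.getD_append_right _ _ _ _ (by omega)]
        rw [ih (j - p.length) (by omega)]
        have h2 : j % p.length = (j - p.length) % p.length := by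
          conv_lhs => rw [show j = p.length + (j - p.length) by omega]
          exact Nat.add_mod_left _ _
        rw [h2]

-- ---- the full pattern for position k over a signal of length n ----

theorem pv_getD_take_drop (l : List Int) (a b j : Nat) (hj : j < b) (h : a + j < l.length) :
    ((l.drop a).take b).getD j 0 = l.getD (a + j) 0 := by
  have h1 : j < ((l.drop a).take b).length := by
    simp only [List.length_take, List.length_drop]; omega
  rw [List.getD_eq_getElem _ _ h1, List.getD_eq_getElem _ _ h]
  simp [List.getElem_take, List.getElem_drop]

theorem build_pattern_eq (k n : Nat) :
    build_pattern k n = ((pvDouble (pvBase.foldl (fun acc p => acc ++ List.replicate k p) []) n).drop 1).take n := by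
  rw [build_pattern]
  rw [show ((n : Int) + 1) = (((n + 1 : Nat) : Int)) by push_cast; ring_nf,
      show (1 : Int) = (((1 : Nat) : Int)) by norm_num,
      PySem.List.slice_natCast]
  simp

theorem pv_length_flatten_replicate (p : List Int) (m : Nat) :
    ((List.replicate m p).flatten).length = m * p.length := by
  induction m with
  | zero => simp
  | succ m ih =>
      simp only [List.replicate_succ, List.flatten_cons, List.length_append, ih]
      ring

theorem pvDouble_p0_length (k n : Nat) (hk : 0 < k) :
    ∃ m, 0 < m ∧ n < m * (4 * k) ∧
      (pvDouble (pvBase.foldl (fun acc p => acc ++ List.replicate k p) []) n).length = m * (4 * k) := by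
  obtain ⟨m, hm, heq, hlt⟩ :=
    pvDouble_spec (pvBase.foldl (fun acc p => acc ++ List.replicate k p) []) n
      (by rw [pv_p0_length]; omega)
  refine ⟨m, hm, by rw [pv_p0_length] at hlt; exact hlt, ?_⟩
  rw [heq, pv_length_flatten_replicate, pv_p0_length]

theorem build_pattern_length (k n : Nat) (hk : 0 < k) :
    (build_pattern k n).length = n := by
  obtain ⟨m, hm, hlt, hql⟩ := pvDouble_p0_length k n hk
  rw [build_pattern_eq]
  simp only [List.length_take, List.length_drop, hql]
  omega

theorem build_pattern_getD (k n j : Nat) (hk : 0 < k) (hj : j < n) :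
    (build_pattern k n).getD j 0 = pvW k j := by
  obtain ⟨m, hm, hlt, hql⟩ := pvDouble_p0_length k n hk
  obtain ⟨m', hm', heq, hlt'⟩ :=
    pvDouble_spec (pvBase.foldl (fun acc p => acc ++ List.replicate k p) []) n
      (by rw [pv_p0_length]; omega)
  rw [build_pattern_eq, pv_getD_take_drop _ _ _ _ hj (by omega)]
  rw [heq, pv_getD_flatten_replicate _ _ _ (by rw [pv_p0_length]; omega) ?hb]
  case hb =>
    rw [pv_p0_length]
    have hlen : ((List.replicate m' (pvBase.foldl (fun acc p => acc ++ List.replicate k p) [])).flatten).length = m' * (4 * k) := by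
      rw [pv_length_flatten_replicate, pv_p0_length]
    rw [← heq, hql] at hlen
    omega
  rw [pv_p0_length, pv_p0_getD k _ hk (Nat.mod_lt _ (by omega))]
  rw [show 4 * k = k * 4 by ring, Nat.mod_mul_right_div_self]
  rw [pvW, Nat.add_comm 1 j]

-- ---- A's per-position value ----

theorem apply_phase_value (s : List Int) (k : Nat) (hk : 0 < k) :
    ((s.zip (build_pattern k s.length)).map (fun ab => ab.1 * ab.2)).sum =
    pvRef s k 0 s.length := by
  have hzip : (s.zip (build_pattern k s.length)).map (fun ab => ab.1 * ab.2) =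
      List.zipWith (fun a b => a * b) s (build_pattern k s.length) := by
    simp only [List.zip, List.map_zipWith]
  rw [hzip, pv_sum_getD]
  have hlen : (List.zipWith (fun a b : Int => a * b) s (build_pattern k s.length)).length = s.length := by
    simp [build_pattern_length k s.length hk]
  rw [hlen, pvRef, ← Finset.range_eq_Ico]
  refine Finset.sum_congr rfl (fun j hj => ?_)
  rw [Finset.mem_range] at hj
  have hbl : j < (build_pattern k s.length).length := by
    rw [build_pattern_length k s.length hk]; exact hj
  rw [List.getD_eq_getElem _ _ (by rw [hlen]; exact hj),
      List.getD_eq_getElem _ _ hj]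
  rw [List.getElem_zipWith]
  rw [← List.getD_eq_getElem _ (0 : Int) hbl, build_pattern_getD k s.length j hk hj]

-- ---- B's prefix sums ----

def pvPartial (c : Int) : List Int → List Int
  | [] => [c]
  | v :: vs => c :: pvPartial (c + v) vs

theorem pvPrefix_foldl (s : List Int) : ∀ (l : List Int) (c : Int),
    s.foldl (fun pre v => pre ++ [PySem.List.pyGetD pre (-1) 0 + v]) (l ++ [c]) =
    l ++ pvPartial c s := by
  induction s with
  | nil => intro l c; simp [pvPartial]
  | cons v vs ih =>
      intro l c
      rw [List.foldl_cons, PySem.List.pyGetD_neg_one_append_singleton]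
      rw [ih (l ++ [c]) (c + v)]
      simp [pvPartial, List.append_assoc]

theorem pvPartial_getD (s : List Int) : ∀ (c : Int) (m : Nat), m ≤ s.length →
    (pvPartial c s).getD m 0 = c + ∑ j ∈ Finset.range m, s.getD j 0 := by
  induction s with
  | nil =>
      intro c m hm
      have hm0 : m = 0 := by simpa using hm
      subst hm0; simp [pvPartial]
  | cons v vs ih =>
      intro c m hm
      cases m with
      | zero => simp [pvPartial]
      | succ m =>
          rw [pvPartial, List.getD_cons_succ, ih (c + v) m (by simpa using hm)]
          rw [Finset.sum_range_succ']
          simp; ring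

theorem pvPrefix_getD (s : List Int) (m : Nat) (hm : m ≤ s.length) :
    (pvPrefix s).getD m 0 = ∑ j ∈ Finset.range m, s.getD j 0 := by
  have h := pvPrefix_foldl s [] 0
  simp only [List.nil_append] at h
  rw [pvPrefix, h, pvPartial_getD s 0 m hm, zero_add]

-- ---- B's inner loop computes the reference sum ----

theorem pvW_zero_block (k j b : Nat) (hk : 0 < k)
    (h1 : (2 * b + 2) * k ≤ j + 1) (h2 : j + 1 < (2 * b + 3) * k) : pvW k j = 0 := by
  have hd : (j + 1) / k = 2 * b + 2 :=
    Nat.div_eq_of_lt_le h1 (by rw [show (2 * b + 2 + 1) * k = (2 * b + 3) * k by ring]; exact h2)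
  rw [pvW, hd]
  rcases Nat.mod_two_eq_zero_or_one b with hb | hb
  · rw [show (2 * b + 2) % 4 = 2 by omega]; rfl
  · rw [show (2 * b + 2) % 4 = 0 by omega]; rfl

theorem pvW_sign_block (k j b : Nat) (hk : 0 < k)
    (h1 : (2 * b + 1) * k ≤ j + 1) (h2 : j + 1 < (2 * b + 2) * k) :
    pvW k j = (if b % 2 = 0 then (1 : Int) else -1) := by
  have hd : (j + 1) / k = 2 * b + 1 :=
    Nat.div_eq_of_lt_le h1 (by rw [show (2 * b + 1 + 1) * k = (2 * b + 2) * k by ring]; exact h2)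
  rw [pvW, hd]
  rcases Nat.mod_two_eq_zero_or_one b with hb | hb
  · rw [show (2 * b + 1) % 4 = 1 by omega, if_pos hb]; rfl
  · rw [show (2 * b + 1) % 4 = 3 by omega, if_neg (by omega)]; rfl

theorem pvRef_split (s : List Int) (k b : Nat) (hk : 0 < k) (hs : k - 1 + 2 * k * b < s.length) :
    pvRef s k (k - 1 + 2 * k * b) s.length =
    (if b % 2 = 0 then (1 : Int) else -1) *
      ((pvPrefix s).getD (min (k - 1 + 2 * k * b + k) s.length) 0 -
       (pvPrefix s).getD (k - 1 + 2 * k * b) 0) +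
    pvRef s k (k - 1 + 2 * k * b + 2 * k) s.length := by
  have hae : k - 1 + 2 * k * b ≤ min (k - 1 + 2 * k * b + k) s.length := by omega
  have hem : min (k - 1 + 2 * k * b + k) s.length ≤ min (k - 1 + 2 * k * b + 2 * k) s.length := by omega
  have hmn : min (k - 1 + 2 * k * b + 2 * k) s.length ≤ s.length := by omega
  have hen : min (k - 1 + 2 * k * b + k) s.length ≤ s.length := by omega
  simp only [pvRef]
  rw [← Finset.sum_Ico_consecutive (fun j => s.getD j 0 * pvW k j) hae hen,
      ← Finset.sum_Ico_consecutive (fun j => s.getD j 0 * pvW k j) hem hmn]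
  have hhead : ∑ j ∈ Finset.Ico (k - 1 + 2 * k * b) (min (k - 1 + 2 * k * b + k) s.length),
      s.getD j 0 * pvW k j =
      (if b % 2 = 0 then (1 : Int) else -1) *
        ((pvPrefix s).getD (min (k - 1 + 2 * k * b + k) s.length) 0 -
         (pvPrefix s).getD (k - 1 + 2 * k * b) 0) := by
    have hcongr : ∀ j ∈ Finset.Ico (k - 1 + 2 * k * b) (min (k - 1 + 2 * k * b + k) s.length),
        s.getD j 0 * pvW k j = (if b % 2 = 0 then (1 : Int) else -1) * s.getD j 0 := by
      intro j hj
      rw [Finset.mem_Ico] at hj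
      have hx1 : (2 * b + 1) * k = 2 * k * b + k := by ring
      have hx2 : (2 * b + 2) * k = 2 * k * b + 2 * k := by ring
      rw [pvW_sign_block k j b hk (by omega) (by omega)]
      ring
    rw [Finset.sum_congr rfl hcongr, ← Finset.mul_sum]
    rw [Finset.sum_Ico_eq_sub _ hae]
    rw [pvPrefix_getD s _ (by omega), pvPrefix_getD s _ (by omega)]
  have hmid : ∑ j ∈ Finset.Ico (min (k - 1 + 2 * k * b + k) s.length)
      (min (k - 1 + 2 * k * b + 2 * k) s.length), s.getD j 0 * pvW k j = 0 := by
    refine Finset.sum_eq_zero (fun j hj => ?_)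
    rw [Finset.mem_Ico] at hj
    have hx2 : (2 * b + 2) * k = 2 * k * b + 2 * k := by ring
    have hx3 : (2 * b + 3) * k = 2 * k * b + 3 * k := by ring
    rw [pvW_zero_block k j b hk (by omega) (by omega), mul_zero]
  have htail : ∑ j ∈ Finset.Ico (min (k - 1 + 2 * k * b + 2 * k) s.length) s.length,
      s.getD j 0 * pvW k j =
      ∑ j ∈ Finset.Ico (k - 1 + 2 * k * b + 2 * k) s.length, s.getD j 0 * pvW k j := by
    by_cases h : k - 1 + 2 * k * b + 2 * k ≤ s.length
    · rw [min_eq_left h]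
    · rw [min_eq_right (by omega), Finset.Ico_eq_empty (by omega),
          Finset.Ico_eq_empty (by omega)]
  rw [hhead, hmid, htail]
  ring

theorem pvInner_spec (s : List Int) (k : Nat) (hk : 0 < k) :
    ∀ (d b : Nat) (total : Int), s.length - (k - 1 + 2 * k * b) ≤ d →
    pvInner (pvPrefix s) s.length k (k - 1 + 2 * k * b) (if b % 2 = 0 then 1 else -1) total =
    total + pvRef s k (k - 1 + 2 * k * b) s.length := by
  intro d
  induction d with
  | zero =>
      intro b total hd
      rw [pvInner, dif_neg (fun h => by omega)]
      rw [pvRef, Finset.Ico_eq_empty (by omega)]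
      simp
  | succ d ih =>
      intro b total hd
      by_cases hs : k - 1 + 2 * k * b < s.length
      · rw [pvInner, dif_pos ⟨hs, hk⟩]
        have hmul : 2 * k * (b + 1) = 2 * k * b + 2 * k := by ring
        have hstart : k - 1 + 2 * k * b + 2 * k = k - 1 + 2 * k * (b + 1) := by omega
        have hsign : -(if b % 2 = 0 then (1 : Int) else -1) =
            (if (b + 1) % 2 = 0 then (1 : Int) else -1) := by
          rcases Nat.mod_two_eq_zero_or_one b with hb | hb <;>
            simp [hb, Nat.add_mod]
        rw [hstart, hsign, ih (b + 1) _ (by omega)]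
        rw [pvRef_split s k b hk hs]
        ring_nf
      · rw [pvInner, dif_neg (fun h => hs h.1)]
        rw [pvRef, Finset.Ico_eq_empty (by omega)]
        simp

theorem pvInner_value (s : List Int) (k : Nat) (hk : 0 < k) :
    pvInner (pvPrefix s) s.length k (k - 1) 1 0 = pvRef s k 0 s.length := by
  have h := pvInner_spec s k hk s.length 0 0 (by omega)
  norm_num at h
  rw [h]
  have hc1 : 0 ≤ min (k - 1) s.length := by omega
  have hc2 : min (k - 1) s.length ≤ s.length := by omega
  rw [pvRef, pvRef, ← Finset.sum_Ico_consecutive _ hc1 hc2]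
  have hz : ∑ j ∈ Finset.Ico 0 (min (k - 1) s.length), s.getD j 0 * pvW k j = 0 := by
    refine Finset.sum_eq_zero (fun j hj => ?_)
    rw [Finset.mem_Ico] at hj
    have : pvW k j = 0 := by
      rw [pvW, Nat.div_eq_of_lt (by omega)]; rfl
    rw [this, mul_zero]
  rw [hz, zero_add]
  by_cases h2 : k - 1 ≤ s.length
  · rw [min_eq_left h2]
  · rw [min_eq_right (by omega), Finset.Ico_eq_empty (by omega),
        Finset.Ico_eq_empty (by omega)]

-- ===== VERDICT (by name: the statement is the Claim_ definition above) =====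
theorem apply_phase_spec : Claim_equal_apply_phase := by
  intro signal _
  unfold Spec_apply_phase
  simp only [apply_phase, apply_phase_alt]
  refine List.map_congr_left (fun i hi => ?_)
  rw [List.mem_range] at hi
  have hk : 0 < i + 1 := by omega
  rw [apply_phase_value signal (i + 1) hk, pvInner_value signal (i + 1) hk]
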